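-- pv_equiv track=rewrite | github.com/EmanueleBasso/Advent_of_Code_2024 | Day9/program_day_9.py | compact_disk_map
-- ===== SOURCE A (Python) =====
-- def compact_disk_map(disk_map: list[str]) -> list[str]:
--     disk_map_compacted = disk_map.copy()
--
--     last_pos_inserted = 0
--
--     for i in range(len(disk_map_compacted) -1 , 0, -1):
--         compacted = False
--
--         for j in range(last_pos_inserted, i):
--             if disk_map_compacted[j] == ".":
--                 disk_map_compacted[j] = disk_map_compacted[i]
--                 disk_map_compacted[i] = "."
--                 last_pos_inserted = j
--                 compacted = True
--                 break
--
--         if not compacted: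
--             break
--
--     return disk_map_compacted
-- ===== SOURCE B (Python) =====
-- def compact_disk_map(disk_map: list[str]) -> list[str]:
--     disk = disk_map.copy()
--     left = 0
--     right = len(disk) - 1
--     while left < right:
--         if disk[left] != ".":
--             left += 1
--         elif disk[right] == ".":
--             right -= 1
--         else:
--             disk[left], disk[right] = disk[right], disk[left]
--             left += 1
--             right -= 1
--     return disk
-- ===== Notes on version B (the rewrite author's own statement) =====
-- stated objective: simpler
-- what changed: Replaces A's outer-descending loop with an inner scan restarting from last_pos_inserted and a compacted flag by a single converging two-pointer loop (left seeks the next gap, right seeks the next file block, swap).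
import Mathlib
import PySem

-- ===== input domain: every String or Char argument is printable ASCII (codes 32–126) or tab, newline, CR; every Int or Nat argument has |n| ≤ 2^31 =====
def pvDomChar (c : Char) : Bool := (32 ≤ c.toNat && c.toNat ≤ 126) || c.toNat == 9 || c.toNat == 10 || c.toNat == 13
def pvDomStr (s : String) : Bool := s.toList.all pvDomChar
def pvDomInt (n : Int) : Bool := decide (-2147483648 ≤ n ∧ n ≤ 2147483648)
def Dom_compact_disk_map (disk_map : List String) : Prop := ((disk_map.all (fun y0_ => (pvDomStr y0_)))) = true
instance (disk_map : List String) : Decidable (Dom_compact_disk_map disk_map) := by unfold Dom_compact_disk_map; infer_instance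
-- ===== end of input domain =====

-- B replaces A's nested outer-descending/inner-scan loops (with `last_pos_inserted` and a
-- `compacted` flag) by a single converging two-pointer loop; objective: simpler, same result.

-- ===== PORT A =====
-- inner loop `for j in range(last_pos_inserted, i): if disk[j] == '.': break`:
-- returns the index of the first "." in [lo, i), none if the loop finishes without break
def findDotA (disk : List String) (lo i : Nat) : Option Nat :=
  if lo < i then
    if disk.getD lo "" = "." then some lo else findDotA disk (lo + 1) i
  else none
termination_by i - lo

-- outer loop `for i in range(len-1, 0, -1)` with state (disk, last_pos_inserted);
-- `compacted = False` (no "." found) exits the loop early returning the current disk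
def outerA (disk : List String) (last i : Nat) : List String :=
  if h : 1 ≤ i then
    match findDotA disk last i with
    | none => disk
    | some j => outerA ((disk.set j (disk.getD i "")).set i ".") j (i - 1)
  else disk
termination_by i

def compact_disk_map (disk_map : List String) : List String :=
  outerA disk_map 0 (disk_map.length - 1)

-- ===== PORT B =====
-- `while left < right:` two-pointer loop over the copy
def tpB (disk : List String) (l r : Nat) : List String :=
  if h : l < r then
    if disk.getD l "" ≠ "." then tpB disk (l + 1) r
    else if disk.getD r "" = "." then tpB disk l (r - 1)
    else
      -- disk[left], disk[right] = disk[right], disk[left]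
      let a := disk.getD l ""
      let b := disk.getD r ""
      tpB ((disk.set l b).set r a) (l + 1) (r - 1)
  else disk
termination_by r - l

def compact_disk_map_alt (disk_map : List String) : List String :=
  tpB disk_map 0 (disk_map.length - 1)

-- ===== PRECONDITION & SPEC =====
def Spec_compact_disk_map (disk_map : List String) (out : List String) : Prop := out = compact_disk_map_alt disk_map
instance (disk_map : List String) (out : List String) : Decidable (Spec_compact_disk_map disk_map out) := by unfold Spec_compact_disk_map; infer_instance

-- ===== CLAIM (what is proved, stated in full; the proofs are below) =====
def Claim_equal_compact_disk_map : Prop := ∀ (disk_map : List String), Dom_compact_disk_map disk_map → Spec_compact_disk_map disk_map (compact_disk_map disk_map)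

-- ===== LEMMAS AND PROOFS =====

theorem findDotA_none (disk : List String) (lo i : Nat) (h : ¬ lo < i) :
    findDotA disk lo i = none := by
  unfold findDotA; simp [h]

theorem findDotA_hit (disk : List String) (lo i : Nat) (h : lo < i)
    (hd : disk.getD lo "" = ".") : findDotA disk lo i = some lo := by
  simp only [List.getD] at hd
  unfold findDotA; simp [h, hd]

theorem findDotA_step (disk : List String) (lo i : Nat) (h : lo < i)
    (hd : disk.getD lo "" ≠ ".") : findDotA disk lo i = findDotA disk (lo + 1) i := by
  simp only [List.getD] at hd
  conv_lhs => rw [findDotA]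
  simp [h, hd]

-- A's outer loop does not depend on where the scan starts when disk[last] is not "."
theorem outerA_scan (disk : List String) (l i : Nat)
    (hd : disk.getD l "" ≠ ".") : outerA disk l i = outerA disk (l + 1) i := by
  by_cases h1 : 1 ≤ i
  · by_cases hl : l < i
    · rw [outerA, outerA]
      simp only [h1, dif_pos]
      rw [findDotA_step disk l i hl hd]
    · rw [outerA, outerA]
      simp only [h1, dif_pos]
      rw [findDotA_none disk l i hl, findDotA_none disk (l + 1) i (by omega)]
  · rw [outerA, outerA]; simp [h1]

theorem set_getD_self (disk : List String) (l : Nat) (h : disk.getD l "" = ".") :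
    disk.set l "." = disk := by
  have hlen : l < disk.length := by
    by_contra hc
    rw [List.getD, List.getElem?_eq_none (by omega : disk.length ≤ l)] at h
    simp at h
  have hval : disk[l] = "." := by
    rw [List.getD, List.getElem?_eq_getElem hlen] at h
    simpa using h
  apply List.ext_getElem (by simp)
  intro k hk1 hk2
  rw [List.getElem_set]
  split_ifs with e
  · subst e; exact hval.symm
  · rfl

-- main correspondence: A's (disk, last, i) state and B's (disk, left, right) state coincide
theorem main_lemma : ∀ m i l disk, i + (i - l) ≤ m → outerA disk l i = tpB disk l i := by
  intro m
  induction m with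
  | zero =>
      intro i l disk hm
      have hi : i = 0 := by omega
      subst hi
      rw [outerA, tpB]; simp
  | succ m ih =>
      intro i l disk hm
      by_cases hlr : l < i
      · have h1 : 1 ≤ i := by omega
        by_cases hl : disk[l]?.getD "" = "."
        · -- A's scan finds j = l
          by_cases hr : disk[i]?.getD "" = "."
          · -- moving a dot: A's two writes are no-ops; B decrements right
            have hA : outerA disk l i = outerA disk l (i - 1) := by
              rw [outerA]
              simp only [h1, dif_pos]
              rw [findDotA_hit disk l i hlr hl]
              show outerA ((disk.set l (disk.getD i "")).set i ".") l (i - 1) = _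
              simp only [List.getD]
              rw [hr, set_getD_self disk l hl, set_getD_self disk i hr]
            have hB : tpB disk l i = tpB disk l (i - 1) := by
              rw [tpB]; simp [hlr, hl, hr]
            rw [hA, hB]
            exact ih (i - 1) l disk (by omega)
          · -- a real move: both write disk[i] to l and "." to i
            have hA : outerA disk l i
                = outerA ((disk.set l (disk.getD i "")).set i ".") l (i - 1) := by
              rw [outerA]
              simp only [h1, dif_pos]
              rw [findDotA_hit disk l i hlr hl]
            have hB : tpB disk l i
                = tpB ((disk.set l (disk.getD i "")).set i ".") (l + 1) (i - 1) := by
              rw [tpB]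
              simp only [List.getD]
              simp [hlr, hl, hr]
            have hnd : ((disk.set l (disk.getD i "")).set i ".").getD l "" ≠ "." := by
              have hil : i ≠ l := by omega
              simp only [List.getD] at hr ⊢
              by_cases hlen : l < disk.length
              · rw [List.getElem?_eq_getElem (by simpa using hlen)]
                simp [hil]
                simpa [List.getD] using hr
              · rw [List.getElem?_eq_none (by simpa using (by omega : disk.length ≤ l))]
                simp
            rw [hA, hB, outerA_scan _ _ _ hnd]
            exact ih (i - 1) (l + 1) _ (by omega)
        · -- scan forward: A's inner scan skips l, B increments left
          rw [outerA_scan disk l i hl]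
          have hB : tpB disk l i = tpB disk (l + 1) i := by
            rw [tpB]; simp [hlr, hl]
          rw [hB]
          exact ih i (l + 1) disk (by omega)
      · -- l ≥ i: both loops end (A's inner scan finds nothing / outer range empty)
        have hT : tpB disk l i = disk := by rw [tpB]; simp [hlr]
        have hO : outerA disk l i = disk := by
          by_cases h1 : 1 ≤ i
          · rw [outerA]
            simp only [h1, dif_pos]
            rw [findDotA_none disk l i hlr]
          · rw [outerA]; simp [h1]
        rw [hT, hO]

-- ===== VERDICT (by name: the statement is the Claim_ definition above) =====
theorem compact_disk_map_spec : Claim_equal_compact_disk_map := by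
  intro disk _
  unfold Spec_compact_disk_map compact_disk_map compact_disk_map_alt
  exact main_lemma _ _ _ _ (le_refl _)
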